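-- pv_equiv track=rewrite | github.com/lypnol/picross-solver | ModelCoco.py | get_all_possible_rec
-- ===== SOURCE A (Python) =====
-- def get_all_possible_rec(current, restants, size):
--     if restants == []:
--         return [current + [0] * (size - len(current))]
--     a = restants[0]
--     i = len(current)  # position courante
--     possibles = []
--     j = 0  # combien de 0 avant d'ajouter l'élément
--     while i + j + a <= size:
--         p = current + [0] * j + [1] * a
--         if len(p) < size:
--             p.append(0)
--         possibles.append(p)
--         j += 1
--     result = []
--     for p in possibles:
--         r = get_all_possible_rec(p, restants[1:], size)
--         result.extend(r)
--     return result
-- ===== SOURCE B (Python) =====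
-- def get_all_possible_rec(current, restants, size):
--     # Iterative breadth-first expansion: a frontier of partial rows is grown
--     # block by block, then each finished partial is padded with zeros.
--     rows = [current]
--     for a in restants:
--         new_rows = []
--         for p in rows:
--             for j in range(size - len(p) - a + 1):
--                 q = p + [0] * j + [1] * a
--                 if len(q) < size:
--                     q.append(0)
--                 new_rows.append(q)
--         rows = new_rows
--     return [p + [0] * (size - len(p)) for p in rows]
-- ===== Notes on version B (the rewrite author's own statement) =====
-- stated objective: alternative
-- what changed: Replaced A's depth-first recursion (place first block, recurse on the rest with a sliced list) by an iterative breadth-first frontier: a single loop over the blocks expands a list of partial rows via a range-counted placement step, then pads every finished row once at the end.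
import Mathlib
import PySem

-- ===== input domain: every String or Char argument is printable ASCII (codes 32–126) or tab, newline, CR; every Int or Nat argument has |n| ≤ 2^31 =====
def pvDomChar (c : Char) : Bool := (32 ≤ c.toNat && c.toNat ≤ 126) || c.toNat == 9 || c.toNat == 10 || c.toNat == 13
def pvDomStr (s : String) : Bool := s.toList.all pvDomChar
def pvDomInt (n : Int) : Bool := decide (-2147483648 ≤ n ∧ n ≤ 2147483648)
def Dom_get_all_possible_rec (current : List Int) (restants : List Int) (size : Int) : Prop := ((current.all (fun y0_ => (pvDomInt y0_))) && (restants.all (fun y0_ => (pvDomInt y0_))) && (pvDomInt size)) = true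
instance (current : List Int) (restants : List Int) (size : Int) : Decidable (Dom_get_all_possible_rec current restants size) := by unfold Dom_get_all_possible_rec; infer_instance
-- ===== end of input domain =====

-- B replaces A's depth-first recursion by an iterative breadth-first frontier expansion
-- over the blocks (objective: alternative decomposition, same output, same cost).

-- ===== PORT A =====
-- the 'while i + j + a <= size' loop building 'possibles'
def pvWhileA (current : List Int) (a : Int) (size : Int) (j : Int) : List (List Int) :=
  if h : (current.length : Int) + j + a ≤ size then
    let p := current ++ List.replicate j.toNat 0 ++ List.replicate a.toNat 1
    let p := if (p.length : Int) < size then p ++ [0] else p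
    p :: pvWhileA current a size (j + 1)
  else []
termination_by (size - current.length - a - j + 1).toNat
decreasing_by omega

def get_all_possible_rec (current : List Int) (restants : List Int) (size : Int) : List (List Int) :=
  match restants with
  | [] => [current ++ List.replicate (size - current.length).toNat 0]
  | a :: rest =>
    let possibles := pvWhileA current a size 0
    possibles.foldl (fun result p => result ++ get_all_possible_rec p rest size) []

-- ===== PORT B =====
-- the inner 'for j in range(...)' loop of B, placing one block after partial row p
def pvPlaceB (p : List Int) (a : Int) (size : Int) : List (List Int) :=
  (PySem.List.pyRange 0 (size - p.length - a + 1) 1).map (fun j =>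
    let q := p ++ List.replicate j.toNat 0 ++ List.replicate a.toNat 1
    if (q.length : Int) < size then q ++ [0] else q)

def get_all_possible_rec_alt (current : List Int) (restants : List Int) (size : Int) : List (List Int) :=
  (restants.foldl (fun rows a => rows.flatMap (fun p => pvPlaceB p a size)) [current]).map
    (fun p => p ++ List.replicate (size - p.length).toNat 0)

-- ===== PRECONDITION & SPEC =====
def Spec_get_all_possible_rec (current : List Int) (restants : List Int) (size : Int) (out : List (List Int)) : Prop := out = get_all_possible_rec_alt current restants size
instance (current : List Int) (restants : List Int) (size : Int) (out : List (List Int)) : Decidable (Spec_get_all_possible_rec current restants size out) := by unfold Spec_get_all_possible_rec; infer_instance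

-- ===== CLAIM (what is proved, stated in full; the proofs are below) =====
def Claim_equal_get_all_possible_rec : Prop := ∀ (current : List Int) (restants : List Int) (size : Int), Dom_get_all_possible_rec current restants size → Spec_get_all_possible_rec current restants size (get_all_possible_rec current restants size)

-- ===== LEMMAS AND PROOFS =====

-- A's while loop (from counter j) equals B's range-based placement map (from bound j)
lemma pvWhileA_eq_map (current : List Int) (a size : Int) (j : Int) :
    pvWhileA current a size j =
      (PySem.List.pyRange j (size - current.length - a + 1) 1).map (fun ji =>
        let q := current ++ List.replicate ji.toNat 0 ++ List.replicate a.toNat 1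
        if (q.length : Int) < size then q ++ [0] else q) := by
  rw [pvWhileA]
  split
  · rename_i h
    rw [PySem.List.pyRange_one_cons (by omega), List.map_cons, pvWhileA_eq_map current a size (j+1)]
  · rename_i h
    rw [PySem.List.pyRange_one_eq_nil (by omega), List.map_nil]
termination_by (size - current.length - a - j + 1).toNat
decreasing_by omega

lemma pvWhileA_eq_place (current : List Int) (a size : Int) :
    pvWhileA current a size 0 = pvPlaceB current a size := by
  rw [pvWhileA_eq_map, pvPlaceB]

-- main invariant: the breadth-first frontier fold, once padded, equals
-- flat-mapping A's recursion over the frontier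
lemma bfs_eq_flatMapA (restants : List Int) (size : Int) : ∀ (L : List (List Int)),
    (restants.foldl (fun rows a => rows.flatMap (fun p => pvPlaceB p a size)) L).map
        (fun p => p ++ List.replicate (size - p.length).toNat 0)
      = L.flatMap (fun c => get_all_possible_rec c restants size) := by
  induction restants with
  | nil =>
    intro L
    simp only [List.foldl_nil, get_all_possible_rec]
    induction L with
    | nil => simp
    | cons c cs ihL => simp_all
  | cons a rest ih =>
    intro L
    rw [List.foldl_cons, ih]
    rw [List.flatMap_assoc]
    apply List.flatMap_congr
    intro c _
    show _ = get_all_possible_rec c (a :: rest) size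
    rw [get_all_possible_rec]
    rw [PySem.List.foldl_append_eq_flatMap, List.nil_append, pvWhileA_eq_place]

-- ===== VERDICT (by name: the statement is the Claim_ definition above) =====
theorem get_all_possible_rec_spec : Claim_equal_get_all_possible_rec := by
  intro current restants size _
  show get_all_possible_rec current restants size = get_all_possible_rec_alt current restants size
  rw [get_all_possible_rec_alt, bfs_eq_flatMapA]
  simp
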